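-- pv_equiv track=rewrite | github.com/tonyaiuto/aoc | 2019/16/day16.py | do_fft_2
-- ===== SOURCE A (Python) =====
-- def do_fft_2(input, passes=1):
--   end = len(input)
--   for _ in range(passes):
--     rsum = 0
--     for pos in range(end - 1, - 1, -1):
--       rsum += input[pos]
--       input[pos] = rsum % 10
--   return input
-- ===== SOURCE B (Python) =====
-- def do_fft_2(input, passes=1):
--   end = len(input)
--   for _ in range(passes):
--     total = sum(input)
--     prefix = 0
--     for pos in range(end):
--       suffix = total - prefix
--       prefix += input[pos]
--       input[pos] = suffix % 10
--   return input
-- ===== Notes on version B (the rewrite author's own statement) =====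
-- stated objective: alternative
-- what changed: Each pass now traverses the list forward maintaining a precomputed total and a running prefix sum (suffix = total - prefix), instead of A's backward traversal with a running suffix accumulator.
import Mathlib
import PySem

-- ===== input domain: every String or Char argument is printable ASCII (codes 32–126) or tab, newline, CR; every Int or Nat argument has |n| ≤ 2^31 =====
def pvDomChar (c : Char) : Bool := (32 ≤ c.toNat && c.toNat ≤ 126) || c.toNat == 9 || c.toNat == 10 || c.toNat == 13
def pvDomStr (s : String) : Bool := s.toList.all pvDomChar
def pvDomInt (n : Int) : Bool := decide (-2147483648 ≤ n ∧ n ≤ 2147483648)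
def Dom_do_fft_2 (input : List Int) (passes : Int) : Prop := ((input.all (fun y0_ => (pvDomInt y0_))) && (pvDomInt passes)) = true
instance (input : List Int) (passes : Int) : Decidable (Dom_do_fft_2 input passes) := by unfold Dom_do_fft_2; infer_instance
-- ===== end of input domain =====

-- B changes each pass from a backward suffix-accumulator sweep to a forward sweep with a
-- precomputed total and a running prefix sum (objective: alternative decomposition, same cost).
-- Both Pythons mutate `input` in place and return it; the equivalence proved is about the
-- return value (B performs the same in-place mutation).

-- ===== PORT A =====
-- A's inner loop runs pos = end-1 … 0, maintaining rsum (the running suffix sum of the OLD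
-- values) and overwriting input[pos] with rsum % 10; ported as the obvious structural
-- recursion from the right, with the same state (rewritten list, rsum).
def pvPassA : List Int → (List Int × Int)
  | [] => ([], 0)
  | x :: xs =>
      let (ys, rsum) := pvPassA xs
      let r := rsum + x
      ((PySem.Int.mod r 10) :: ys, r)

-- outer loop `for _ in range(passes)`: passes.toNat iterations (range is empty for passes ≤ 0)
def pvIterA : Nat → List Int → List Int
  | 0, l => l
  | n + 1, l => pvIterA n (pvPassA l).1

def do_fft_2 (input : List Int) (passes : Int) : List Int :=
  pvIterA passes.toNat input

-- ===== PORT B =====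
-- B's inner loop goes forward with accumulator `prefix`, writing (total - prefix) % 10.
def pvPassB (total : Int) : Int → List Int → List Int
  | _, [] => []
  | pref, x :: xs => (PySem.Int.mod (total - pref) 10) :: pvPassB total (pref + x) xs

def pvIterB : Nat → List Int → List Int
  | 0, l => l
  | n + 1, l => pvIterB n (pvPassB l.sum 0 l)

def do_fft_2_alt (input : List Int) (passes : Int) : List Int :=
  pvIterB passes.toNat input

-- ===== PRECONDITION & SPEC =====
def Spec_do_fft_2 (input : List Int) (passes : Int) (out : List Int) : Prop := out = do_fft_2_alt input passes
instance (input : List Int) (passes : Int) (out : List Int) : Decidable (Spec_do_fft_2 input passes out) := by unfold Spec_do_fft_2; infer_instance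

-- ===== CLAIM (what is proved, stated in full; the proofs are below) =====
def Claim_equal_do_fft_2 : Prop := ∀ (input : List Int) (passes : Int), Dom_do_fft_2 input passes → Spec_do_fft_2 input passes (do_fft_2 input passes)

-- ===== LEMMAS AND PROOFS =====

lemma pvPassA_snd (xs : List Int) : (pvPassA xs).2 = xs.sum := by
  induction xs with
  | nil => simp [pvPassA]
  | cons x xs ih => simp [pvPassA, ih]; ring

lemma pvPassA_eq_passB (xs : List Int) (p : Int) :
    (pvPassA xs).1 = pvPassB (p + xs.sum) p xs := by
  induction xs generalizing p with
  | nil => simp [pvPassA, pvPassB]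
  | cons x xs ih =>
      simp only [pvPassA, pvPassB, List.sum_cons, List.cons.injEq]
      refine ⟨by rw [pvPassA_snd]; ring_nf, ?_⟩
      rw [ih (p + x)]; ring_nf

lemma pvIter_eq (n : Nat) (l : List Int) : pvIterA n l = pvIterB n l := by
  induction n generalizing l with
  | zero => rfl
  | succ n ih =>
      simp only [pvIterA, pvIterB, ih]
      congr 1
      have := pvPassA_eq_passB l 0
      simpa using this

-- ===== VERDICT (by name: the statement is the Claim_ definition above) =====
theorem do_fft_2_spec : Claim_equal_do_fft_2 := by
  intro input passes _
  show do_fft_2 input passes = do_fft_2_alt input passes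
  simp [do_fft_2, do_fft_2_alt, pvIter_eq]
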